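-- pv_equiv track=rewrite | github.com/beatreichenbach/realflare | realflare/api/tasks/rasterizing.py | quad_vertexes
-- ===== SOURCE A (Python) =====
-- def quad_vertexes(n: int) -> list[tuple[int, int, int, int]]:
--     # returns a list of tuples (vertex indexes per quad)
--     # n is the amount of rows of the vertex grid
--     # v1, v2, v3 are the vertexes making up a triangle
--     indexes = []
--     for x in range(n - 1):
--         for y in range(n - 1):
--             v1 = x * n + y
--             v2 = v1 + 1
--             v3 = v2 + n
--             v4 = v1 + n
--
--             indexes.append((v1, v2, v3, v4))
--     return indexes
-- ===== SOURCE B (Python) =====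
-- def quad_vertexes(n: int) -> list[tuple[int, int, int, int]]:
--     # single pass over all grid vertexes; skip right-edge column and bottom row
--     if n < 2:
--         return []
--     return [(v1, v1 + 1, v1 + n + 1, v1 + n)
--             for v1 in range(n * n)
--             if v1 % n != n - 1 and v1 < n * (n - 1)]
-- ===== Notes on version B (the rewrite author's own statement) =====
-- stated objective: alternative
-- what changed: Replaces A's nested x/y loops over the (n-1)x(n-1) quad grid by a single filtered pass over all n*n vertex indexes, skipping the right-edge column (v1 % n == n-1) and the bottom row (v1 >= n*(n-1)).
import Mathlib
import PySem

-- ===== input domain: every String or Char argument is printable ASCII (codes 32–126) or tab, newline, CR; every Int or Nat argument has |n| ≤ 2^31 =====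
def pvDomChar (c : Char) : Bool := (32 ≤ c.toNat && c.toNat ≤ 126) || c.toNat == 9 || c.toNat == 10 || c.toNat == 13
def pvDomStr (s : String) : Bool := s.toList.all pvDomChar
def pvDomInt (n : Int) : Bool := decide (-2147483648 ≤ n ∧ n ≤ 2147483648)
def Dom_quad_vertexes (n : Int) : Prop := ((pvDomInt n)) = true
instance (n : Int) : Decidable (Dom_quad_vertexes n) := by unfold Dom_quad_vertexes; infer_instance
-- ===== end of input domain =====

-- B replaces A's nested x/y loops by a single filtered pass over all vertex indexes (alternative decomposition, same cost).

-- ===== PORT A =====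
def quad_vertexes (n : Int) : List (Int × Int × Int × Int) :=
  (PySem.List.pyRange 0 (n - 1)).foldl (fun indexes x =>
    (PySem.List.pyRange 0 (n - 1)).foldl (fun indexes y =>
      let v1 := x * n + y
      let v2 := v1 + 1
      let v3 := v2 + n
      let v4 := v1 + n
      indexes ++ [(v1, v2, v3, v4)]) indexes) []

-- ===== PORT B =====
def quad_vertexes_alt (n : Int) : List (Int × Int × Int × Int) :=
  if n < 2 then []
  else (PySem.List.pyRange 0 (n * n)).filterMap (fun v1 =>
    if PySem.Int.mod v1 n ≠ n - 1 ∧ v1 < n * (n - 1)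
    then some (v1, v1 + 1, v1 + n + 1, v1 + n) else none)

-- ===== PRECONDITION & SPEC =====
def Spec_quad_vertexes (n : Int) (out : List (Int × Int × Int × Int)) : Prop := out = quad_vertexes_alt n
instance (n : Int) (out : List (Int × Int × Int × Int)) : Decidable (Spec_quad_vertexes n out) := by unfold Spec_quad_vertexes; infer_instance

-- ===== CLAIM (what is proved, stated in full; the proofs are below) =====
def Claim_equal_quad_vertexes : Prop := ∀ (n : Int), Dom_quad_vertexes n → Spec_quad_vertexes n (quad_vertexes n)

-- ===== LEMMAS AND PROOFS =====

-- canonical row x of the quad grid (proof-only helper)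
def pvRowC (m x : Nat) : List (Int × Int × Int × Int) :=
  (List.range (m - 1)).map (fun y : Nat =>
    (((x * m + y : Nat) : Int), ((x * m + y : Nat) : Int) + 1,
     ((x * m + y : Nat) : Int) + 1 + (m : Int), ((x * m + y : Nat) : Int) + (m : Int)))

-- A as a flatMap of canonical rows.
lemma quadA_eq (m : Nat) :
    quad_vertexes (m : Int) = (List.range (m - 1)).flatMap (pvRowC m) := by
  rcases Nat.eq_zero_or_pos m with h0 | h0
  · subst h0
    unfold quad_vertexes
    simp [PySem.List.pyRange]
  · have h : ((m : Int) - 1) = ((m - 1 : Nat) : Int) := by omega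
    unfold quad_vertexes
    rw [h, PySem.List.pyRange_zero_natCast, List.foldl_map]
    have hstep : ∀ (acc : List (Int × Int × Int × Int)) (x : Nat),
        List.foldl (fun indexes (y : Int) =>
          indexes ++ [((x : Int) * m + y, (x : Int) * m + y + 1,
                       (x : Int) * m + y + 1 + m, (x : Int) * m + y + m)]) acc
          ((List.range (m - 1)).map (fun k : Nat => (k : Int))) = acc ++ pvRowC m x := by
      intro acc x
      rw [List.foldl_map]
      refine (PySem.List.foldl_append_singleton_eq_map
        (f := fun y : Nat => ((x : Int) * m + y, (x : Int) * m + y + 1,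
                              (x : Int) * m + y + 1 + m, (x : Int) * m + y + m)) _ _).trans ?_
      congr 1
    have hmain : ∀ (l : List Nat) (acc : List (Int × Int × Int × Int)),
        List.foldl (fun indexes (x : Nat) =>
          List.foldl (fun indexes (y : Int) =>
            indexes ++ [((x : Int) * m + y, (x : Int) * m + y + 1,
                         (x : Int) * m + y + 1 + m, (x : Int) * m + y + m)]) indexes
            ((List.range (m - 1)).map (fun k : Nat => (k : Int)))) acc l =
          acc ++ l.flatMap (pvRowC m) := by
      intro l
      induction l with
      | nil => intro acc; simp
      | cons x l ih =>
          intro acc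
          rw [List.foldl_cons, ih, hstep acc x, List.flatMap_cons, List.append_assoc]
    exact (hmain (List.range (m - 1)) []).trans (by rw [List.nil_append])

-- Generic row split of a filterMap over range (k * m).
lemma filterMap_range_mul {β : Type} (m : Nat) (h : Nat → Option β) :
    ∀ k : Nat, (List.range (k * m)).filterMap h =
      (List.range k).flatMap (fun x => (List.range m).filterMap (fun y => h (x * m + y))) := by
  intro k
  induction k with
  | zero => simp
  | succ k ih =>
    have e : (k + 1) * m = k * m + m := by ring
    rw [e, List.range_add, List.filterMap_append, ih, List.range_succ]
    simp [List.filterMap_map, Function.comp]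

-- One block of B's filtered pass equals one canonical row (or nothing on the bottom row).
lemma block_eq (m x : Nat) (hm : 2 ≤ m) (hx : x < m) :
    (List.range m).filterMap (fun y : Nat =>
        if PySem.Int.mod ((x * m + y : Nat) : Int) (m : Int) ≠ (m : Int) - 1 ∧
           ((x * m + y : Nat) : Int) < (m : Int) * ((m : Int) - 1)
        then some (((x * m + y : Nat) : Int), ((x * m + y : Nat) : Int) + 1,
                   ((x * m + y : Nat) : Int) + (m : Int) + 1,
                   ((x * m + y : Nat) : Int) + (m : Int))
        else none) = (if x < m - 1 then pvRowC m x else []) := by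
  have hcm1 : ((m - 1 : Nat) : Int) = (m : Int) - 1 := by omega
  have hmm1 : ((m * (m - 1) : Nat) : Int) = (m : Int) * ((m : Int) - 1) := by
    push_cast [Nat.cast_sub (show 1 ≤ m by omega)]; ring
  have hmod : ∀ y : Nat, y < m →
      PySem.Int.mod ((x * m + y : Nat) : Int) (m : Int) = (y : Int) := by
    intro y hy
    rw [PySem.Int.mod_natCast]
    congr 1
    simp [Nat.add_mod, Nat.mul_mod_left, Nat.mod_eq_of_lt hy]
  by_cases hxe : x < m - 1
  · rw [if_pos hxe]
    rw [show List.range m = List.range (m - 1) ++ [m - 1] from by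
      rw [← List.range_succ]; congr 1; omega]
    rw [List.filterMap_append]
    have htail : (List.filterMap (fun y : Nat =>
        if PySem.Int.mod ((x * m + y : Nat) : Int) (m : Int) ≠ (m : Int) - 1 ∧
           ((x * m + y : Nat) : Int) < (m : Int) * ((m : Int) - 1)
        then some (((x * m + y : Nat) : Int), ((x * m + y : Nat) : Int) + 1,
                   ((x * m + y : Nat) : Int) + (m : Int) + 1,
                   ((x * m + y : Nat) : Int) + (m : Int))
        else none) [m - 1]) = [] := by
      simp only [List.filterMap_cons, List.filterMap_nil]
      rw [hmod (m - 1) (by omega), if_neg (fun hc => hc.1 hcm1)]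
    rw [htail, List.append_nil]
    have hhead : ∀ y ∈ List.range (m - 1),
        (if PySem.Int.mod ((x * m + y : Nat) : Int) (m : Int) ≠ (m : Int) - 1 ∧
            ((x * m + y : Nat) : Int) < (m : Int) * ((m : Int) - 1)
         then some (((x * m + y : Nat) : Int), ((x * m + y : Nat) : Int) + 1,
                    ((x * m + y : Nat) : Int) + (m : Int) + 1,
                    ((x * m + y : Nat) : Int) + (m : Int))
         else none) =
        (some ∘ fun y : Nat =>
          (((x * m + y : Nat) : Int), ((x * m + y : Nat) : Int) + 1,
           ((x * m + y : Nat) : Int) + 1 + (m : Int),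
           ((x * m + y : Nat) : Int) + (m : Int))) y := by
      intro y hy
      rw [List.mem_range] at hy
      have hlt : x * m + y < m * (m - 1) := by
        have e1 : (x + 1) * m = x * m + m := by ring
        have h2 : (x + 1) * m ≤ (m - 1) * m := Nat.mul_le_mul_right m (by omega)
        have e2 : (m - 1) * m = m * (m - 1) := Nat.mul_comm _ _
        omega
      rw [hmod y (by omega), if_pos]
      · simp only [Function.comp, Option.some.injEq, Prod.mk.injEq]
        refine ⟨trivial, trivial, by ring, trivial⟩
      · refine ⟨fun hc => ?_, ?_⟩
        · have : (y : Int) = ((m - 1 : Nat) : Int) := by rw [hcm1]; exact hc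
          have : y = m - 1 := by exact_mod_cast this
          omega
        · rw [← hmm1]
          exact_mod_cast hlt
    rw [List.filterMap_congr hhead, List.filterMap_eq_map]
    rfl
  · rw [if_neg hxe]
    have hx' : x = m - 1 := by omega
    subst hx'
    rw [List.filterMap_eq_nil_iff.mpr]
    intro y hy
    rw [List.mem_range] at hy
    rw [if_neg]
    rintro ⟨-, h2⟩
    rw [← hmm1] at h2
    have h2' : (m - 1) * m + y < m * (m - 1) := by exact_mod_cast h2
    have e2 : (m - 1) * m = m * (m - 1) := Nat.mul_comm _ _
    omega

-- B as a flatMap of canonical rows.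
lemma quadB_eq (m : Nat) (hm : 2 ≤ m) :
    quad_vertexes_alt (m : Int) = (List.range (m - 1)).flatMap (pvRowC m) := by
  unfold quad_vertexes_alt
  have hnot : ¬ ((m : Int) < 2) := by omega
  rw [if_neg hnot]
  rw [show ((m : Int) * (m : Int)) = ((m * m : Nat) : Int) from by push_cast; ring]
  rw [PySem.List.pyRange_zero_natCast, List.filterMap_map]
  rw [filterMap_range_mul m _ m]
  have hblocks : ∀ x ∈ List.range m,
      (List.range m).filterMap (fun y =>
        ((fun v1 : Int =>
            if PySem.Int.mod v1 (m : Int) ≠ (m : Int) - 1 ∧ v1 < (m : Int) * ((m : Int) - 1)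
            then some (v1, v1 + 1, v1 + (m : Int) + 1, v1 + (m : Int)) else none) ∘
          fun k : Nat => (k : Int)) (x * m + y)) =
      (if x < m - 1 then pvRowC m x else []) := by
    intro x hx
    rw [List.mem_range] at hx
    rw [← block_eq m x hm hx]
    rfl
  rw [List.flatMap_congr hblocks]
  rw [show List.range m = List.range (m - 1) ++ [m - 1] from by
    rw [← List.range_succ]; congr 1; omega]
  rw [List.flatMap_append]
  have htail : List.flatMap (fun x => if x < m - 1 then pvRowC m x else []) [m - 1] = [] := by
    simp
  rw [htail, List.append_nil]
  apply List.flatMap_congr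
  intro x hx
  rw [List.mem_range] at hx
  rw [if_pos (by omega)]

-- Main equality for every n.
lemma quad_eq_all (n : Int) : quad_vertexes n = quad_vertexes_alt n := by
  by_cases hn : n < 2
  · unfold quad_vertexes quad_vertexes_alt
    rw [if_pos hn]
    have hr : PySem.List.pyRange 0 (n - 1) = [] := by
      simp [PySem.List.pyRange]
      omega
    rw [hr]
    simp
  · rw [Int.not_lt] at hn
    obtain ⟨m, rfl⟩ : ∃ m : Nat, n = (m : Int) := ⟨n.toNat, by omega⟩
    have hm : 2 ≤ m := by exact_mod_cast hn
    rw [quadA_eq m, quadB_eq m hm]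

-- ===== VERDICT (by name: the statement is the Claim_ definition above) =====
theorem quad_vertexes_spec : Claim_equal_quad_vertexes := by
  intro n _
  unfold Spec_quad_vertexes
  exact quad_eq_all n
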